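-- pv_equiv track=rewrite | github.com/Syndica/sig | conformance/parseout/parseout/parser.py | _collect_brace_block
-- ===== SOURCE A (Python) =====
-- def _collect_brace_block(lines: list[str], start: int) -> tuple[list[str], int]:
--     """Collect lines inside matching braces, handling nesting."""
--     depth = 1
--     collected: list[str] = []
--     i = start
--     while i < len(lines):
--         stripped = lines[i].strip()
--         if stripped == "}":
--             depth -= 1
--             if depth == 0:
--                 return collected, i
--         elif stripped.endswith("{"):
--             depth += 1
--             collected.append(lines[i])
--         else:
--             collected.append(lines[i])
--         i += 1
--     return collected, len(lines) - 1
-- ===== SOURCE B (Python) =====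
-- def _collect_brace_block(lines: list[str], start: int) -> tuple[list[str], int]:
--     """Two passes: first locate the matching closing brace, then collect the
--     block's lines with a comprehension (dropping all bare "}" lines)."""
--     n = len(lines)
--     depth = 1
--     end = None
--     i = start
--     while i < n:
--         s = lines[i].strip()
--         if s == "}":
--             depth -= 1
--             if depth == 0:
--                 end = i
--                 break
--         elif s.endswith("{"):
--             depth += 1
--         i += 1
--     if end is None:
--         return [lines[j] for j in range(start, n) if lines[j].strip() != "}"], n - 1
--     return [lines[j] for j in range(start, end) if lines[j].strip() != "}"], end
-- ===== Notes on version B (the rewrite author's own statement) =====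
-- stated objective: alternative
-- what changed: B splits A's single collect-as-you-go loop into two passes: a first depth-tracking scan that only finds the matching close index, then a comprehension over the index range that filters out bare "}" lines.
import Mathlib
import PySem

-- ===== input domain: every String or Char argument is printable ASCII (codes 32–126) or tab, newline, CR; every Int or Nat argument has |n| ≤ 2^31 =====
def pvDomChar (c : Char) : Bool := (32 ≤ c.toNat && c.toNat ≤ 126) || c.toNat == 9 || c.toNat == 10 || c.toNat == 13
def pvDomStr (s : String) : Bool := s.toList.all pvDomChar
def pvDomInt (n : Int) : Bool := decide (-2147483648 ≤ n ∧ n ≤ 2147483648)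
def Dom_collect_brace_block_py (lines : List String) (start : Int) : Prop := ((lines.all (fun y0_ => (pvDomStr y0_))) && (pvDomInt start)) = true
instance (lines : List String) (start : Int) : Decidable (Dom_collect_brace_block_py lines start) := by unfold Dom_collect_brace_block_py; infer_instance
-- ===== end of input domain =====

-- B finds the matching-close index in a depth-only first pass and then collects the
-- block lines with a filtering comprehension (objective: alternative decomposition; same cost).

-- ===== PORT A =====
-- A's while loop; collected is accumulated as in the Python, lines[i] via pyGet?
def pvALoop (lines : List String) (depth : Int) (collected : List String) (i : Int) :
    List String × Int :=
  if _h : i < (lines.length : Int) then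
    match PySem.List.pyGet? lines i with
    | none => (collected, (lines.length : Int) - 1)  -- IndexError in Python; outside Pre_
    | some line =>
      let stripped := PySem.Str.strip line
      if stripped = "}" then
        if depth - 1 = 0 then (collected, i)
        else pvALoop lines (depth - 1) collected (i + 1)
      else if PySem.Str.endswith stripped "{" then
        pvALoop lines (depth + 1) (collected ++ [line]) (i + 1)
      else
        pvALoop lines depth (collected ++ [line]) (i + 1)
  else (collected, (lines.length : Int) - 1)
termination_by ((lines.length : Int) - i).toNat
decreasing_by all_goals omega

def collect_brace_block_py (lines : List String) (start : Int) : List String × Int :=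
  pvALoop lines 1 [] start

-- ===== PORT B =====
-- first pass: find the index of the matching "}" (none = loop ran off the end)
def pvBFind (lines : List String) (depth : Int) (i : Int) : Option Int :=
  if _h : i < (lines.length : Int) then
    match PySem.List.pyGet? lines i with
    | none => none  -- IndexError in Python; outside Pre_
    | some line =>
      let s := PySem.Str.strip line
      if s = "}" then
        if depth - 1 = 0 then some i else pvBFind lines (depth - 1) (i + 1)
      else if PySem.Str.endswith s "{" then pvBFind lines (depth + 1) (i + 1)
      else pvBFind lines depth (i + 1)
  else none
termination_by ((lines.length : Int) - i).toNat
decreasing_by all_goals omega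

-- second pass: [lines[j] for j in range(a, b) if lines[j].strip() != "}"]
def pvCollect (lines : List String) (a b : Int) : List String :=
  (PySem.List.pyRange a b 1).filterMap (fun j =>
    match PySem.List.pyGet? lines j with
    | none => none  -- IndexError in Python; outside Pre_
    | some l => if PySem.Str.strip l = "}" then none else some l)

def collect_brace_block_py_alt (lines : List String) (start : Int) : List String × Int :=
  match pvBFind lines 1 start with
  | some e => (pvCollect lines start e, e)
  | none => (pvCollect lines start (lines.length : Int), (lines.length : Int) - 1)

-- ===== PRECONDITION & SPEC =====
-- Pre_ excludes exactly the inputs where Python A raises IndexError: start < -len(lines)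
-- (the first lines[start] access then wraps below the list).
def Pre_collect_brace_block_py (lines : List String) (start : Int) : Prop :=
  -(lines.length : Int) ≤ start
instance (lines : List String) (start : Int) : Decidable (Pre_collect_brace_block_py lines start) := by
  unfold Pre_collect_brace_block_py; infer_instance

def pvWitness_collect_brace_block_py : List String × Int :=
  (["a {", "b", "}", "}"], 1)

def Spec_collect_brace_block_py (lines : List String) (start : Int) (out : List String × Int) : Prop := out = collect_brace_block_py_alt lines start
instance (lines : List String) (start : Int) (out : List String × Int) : Decidable (Spec_collect_brace_block_py lines start out) := by unfold Spec_collect_brace_block_py; infer_instance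

-- ===== CLAIM (what is proved, stated in full; the proofs are below) =====
def Claim_equal_collect_brace_block_py : Prop := ∀ (lines : List String) (start : Int), Dom_collect_brace_block_py lines start → Pre_collect_brace_block_py lines start → Spec_collect_brace_block_py lines start (collect_brace_block_py lines start)

-- ===== LEMMAS AND PROOFS =====

lemma pvBFind_ge (lines : List String) (depth : Int) (i e : Int)
    (h : pvBFind lines depth i = some e) : i ≤ e := by
  by_cases hl : i < (lines.length : Int)
  · rw [pvBFind, dif_pos hl] at h
    cases hg : PySem.List.pyGet? lines i with
    | none => rw [hg] at h; simp at h
    | some line =>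
      rw [hg] at h
      simp only at h
      split_ifs at h with h1 h2 h3
      · simp at h; omega
      · have := pvBFind_ge lines (depth - 1) (i + 1) e h; omega
      · have := pvBFind_ge lines (depth + 1) (i + 1) e h; omega
      · have := pvBFind_ge lines depth (i + 1) e h; omega
  · rw [pvBFind, dif_neg hl] at h; simp at h
termination_by ((lines.length : Int) - i).toNat
decreasing_by all_goals omega

lemma pvCollect_nil (lines : List String) (a b : Int) (h : b ≤ a) :
    pvCollect lines a b = [] := by
  simp [pvCollect, PySem.List.pyRange_one_eq_nil h]

lemma pvCollect_step (lines : List String) (a b : Int) (h : a < b) :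
    pvCollect lines a b =
      (match PySem.List.pyGet? lines a with
       | none => none
       | some l => if PySem.Str.strip l = "}" then none else some l).toList
        ++ pvCollect lines (a + 1) b := by
  simp [pvCollect, PySem.List.pyRange_one_cons h, List.filterMap_cons]
  cases PySem.List.pyGet? lines a
  · simp
  · simp only [Option.toList]
    split_ifs <;> simp

lemma pvLoop_eq (lines : List String) :
    ∀ (n : Nat) (depth : Int) (collected : List String) (i : Int),
      (((lines.length : Int) - i).toNat ≤ n) → -(lines.length : Int) ≤ i →
      pvALoop lines depth collected i =
        (match pvBFind lines depth i with
         | some e => (collected ++ pvCollect lines i e, e)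
         | none => (collected ++ pvCollect lines i (lines.length : Int),
                    (lines.length : Int) - 1)) := by
  intro n
  induction n with
  | zero =>
    intro depth collected i hn hi
    have hl : ¬ i < (lines.length : Int) := by omega
    rw [pvALoop, dif_neg hl, pvBFind, dif_neg hl,
      pvCollect_nil lines i (lines.length : Int) (by omega)]
    simp
  | succ m ih =>
    intro depth collected i hn hi
    by_cases hl : i < (lines.length : Int)
    · have hin : PySem.Raise.InRange lines.length i := by
        constructor <;> omega
      cases hg : PySem.List.pyGet? lines i with
      | none =>
        exact absurd hin ((PySem.List.pyGet?_eq_none_iff lines i).mp hg)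
      | some line =>
        rw [pvALoop, dif_pos hl, hg, pvBFind, dif_pos hl, hg]
        simp only
        by_cases h1 : PySem.Str.strip line = "}"
        · rw [if_pos h1, if_pos h1]
          by_cases h2 : depth - 1 = 0
          · rw [if_pos h2, if_pos h2]
            simp [pvCollect_nil lines i i le_rfl]
          · rw [if_neg h2, if_neg h2]
            rw [ih (depth - 1) collected (i + 1) (by omega) (by omega)]
            cases hf : pvBFind lines (depth - 1) (i + 1) with
            | some e =>
              have he : i + 1 ≤ e := pvBFind_ge lines _ _ _ hf
              simp only
              rw [pvCollect_step lines i e (by omega)]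
              simp [hg, h1]
            | none =>
              simp only
              rw [pvCollect_step lines i (lines.length : Int) hl]
              simp [hg, h1]
        · rw [if_neg h1, if_neg h1]
          -- both remaining branches of A append line and recurse; B's find recurses
          have key : ∀ d' : Int,
              pvALoop lines d' (collected ++ [line]) (i + 1) =
                (match pvBFind lines d' (i + 1) with
                 | some e => (collected ++ pvCollect lines i e, e)
                 | none => (collected ++ pvCollect lines i (lines.length : Int),
                            (lines.length : Int) - 1)) := by
            intro d'
            rw [ih d' (collected ++ [line]) (i + 1) (by omega) (by omega)]
            cases hf : pvBFind lines d' (i + 1) with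
            | some e =>
              have he : i + 1 ≤ e := pvBFind_ge lines _ _ _ hf
              simp only
              rw [pvCollect_step lines i e (by omega), hg]
              simp [h1]
            | none =>
              simp only
              rw [pvCollect_step lines i (lines.length : Int) hl, hg]
              simp [h1]
          by_cases h3 : PySem.Str.endswith (PySem.Str.strip line) "{"
          · rw [if_pos h3, if_pos h3]; exact key (depth + 1)
          · rw [if_neg h3, if_neg h3]; exact key depth
    · rw [pvALoop, dif_neg hl, pvBFind, dif_neg hl,
        pvCollect_nil lines i (lines.length : Int) (by omega)]
      simp

-- ===== VERDICT (by name: the statement is the Claim_ definition above) =====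
theorem collect_brace_block_py_spec : Claim_equal_collect_brace_block_py := by
  intro lines start _hdom hpre
  unfold Spec_collect_brace_block_py collect_brace_block_py collect_brace_block_py_alt
  rw [pvLoop_eq lines ((lines.length : Int) - start).toNat 1 [] start le_rfl hpre]
  cases pvBFind lines 1 start <;> simp
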